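-- pv_equiv track=rewrite | github.com/narien/AoC2020 | day4/PassportProcessing.py | buildRegister
-- ===== SOURCE A (Python) =====
-- def buildRegister(input):
--     passportRegister = []
--     newEntry = dict()
--     for word in input:
--         if len(word):
--             key, val = word.split(':')
--             newEntry[key] = val
--         else:
--             passportRegister.append(newEntry)
--             newEntry = dict()
--     return passportRegister
-- ===== SOURCE B (Python) =====
-- def buildRegister(input):
--     # phase 1: parse every token (None marks a group delimiter)
--     parsed = []
--     for w in input:
--         if w:
--             key, val = w.split(':')
--             parsed.append((key, val))
--         else:
--             parsed.append(None)
--     # phase 2: each delimiter closes the group of pairs since `start`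
--     register = []
--     start = 0
--     for i, p in enumerate(parsed):
--         if p is None:
--             register.append(dict(parsed[start:i]))
--             start = i + 1
--     return register
-- ===== Notes on version B (the rewrite author's own statement) =====
-- stated objective: alternative
-- what changed: B is two-phase: it first parses every token into a (key, value) pair (None marking delimiters), then treats empty words as group delimiters and builds each passport dict in one shot from the slice of pairs between delimiters, instead of A's single pass that mutates a running dict and resets it on each empty word.
import Mathlib
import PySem

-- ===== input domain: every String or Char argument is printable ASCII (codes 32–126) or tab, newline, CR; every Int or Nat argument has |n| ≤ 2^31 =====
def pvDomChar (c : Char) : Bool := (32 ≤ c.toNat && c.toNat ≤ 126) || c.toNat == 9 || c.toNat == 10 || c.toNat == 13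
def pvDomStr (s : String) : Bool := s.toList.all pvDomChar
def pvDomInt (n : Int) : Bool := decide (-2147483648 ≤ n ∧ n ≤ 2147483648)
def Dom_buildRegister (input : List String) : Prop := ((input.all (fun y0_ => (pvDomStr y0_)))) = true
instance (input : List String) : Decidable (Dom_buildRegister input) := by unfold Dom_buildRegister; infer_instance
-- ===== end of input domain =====

-- B rewrite: two-phase parse-then-group (parse every token into a pair, then build each dict in
-- one shot from the slice between delimiters) instead of A's single pass mutating a running dict;
-- same cost — 'alternative'.

-- ===== PORT A =====
-- one loop iteration of A: nonempty word → split and store; empty word → close the group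
def aStep (st : List (List (String × String)) × PySem.Dict String String) (word : String) :
    List (List (String × String)) × PySem.Dict String String :=
  if PySem.Str.len word ≠ 0 then
    match PySem.Str.split? word ":" with
    | some [k, v] => (st.1, st.2.insert k v)
    | _ => st      -- Python raises ValueError (unpack) here; excluded by Pre_buildRegister
  else (st.1 ++ [st.2.items], PySem.Dict.empty)

def buildRegister (input : List String) : List (List (String × String)) :=
  (input.foldl aStep ([], PySem.Dict.empty)).1

-- ===== PORT B =====
-- phase 1 of Source B, one token: nonempty word → its (key, val) pair; empty word → none (delimiter)
def parseTok (w : String) : Option (String × String) :=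
  if PySem.Str.len w ≠ 0 then
    match PySem.Str.split? w ":" with
    | some [k, v] => some (k, v)
    | _ => none    -- Python raises ValueError (unpack) here; excluded by Pre_buildRegister
  else none

-- dict(pairs): fold the pairs of a slice into a fresh dict (last value wins, as in Python)
def segStep (d : PySem.Dict String String) (p : Option (String × String)) :
    PySem.Dict String String :=
  match p with
  | some (k, v) => d.insert k v
  | none => d

def dictOfSeg (seg : List (Option (String × String))) : List (String × String) :=
  (seg.foldl segStep PySem.Dict.empty).items

-- phase 2 of Source B, one iteration: a delimiter closes the group of pairs since `start`
def bStep (parsed : List (Option (String × String)))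
    (st : List (List (String × String)) × Int) (p : Int × Option (String × String)) :
    List (List (String × String)) × Int :=
  match p.2 with
  | none => (st.1 ++ [dictOfSeg (PySem.List.slice parsed (some st.2) (some p.1))], p.1 + 1)
  | some _ => st

def buildRegister_alt (input : List String) : List (List (String × String)) :=
  let parsed := input.foldl (fun acc w => acc ++ [parseTok w]) []
  ((PySem.List.enumerate parsed 0).foldl (bStep parsed) ([], 0)).1

-- ===== PRECONDITION & SPEC =====
-- Pre_ excludes exactly the inputs on which Python A raises ValueError: a nonempty word that
-- does not split on ':' into exactly two parts.
def Pre_buildRegister (input : List String) : Prop :=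
  ∀ w ∈ input, w ≠ "" → ((PySem.Str.split? w ":").getD []).length = 2
instance (input : List String) : Decidable (Pre_buildRegister input) := by
  unfold Pre_buildRegister; infer_instance

def pvWitness_buildRegister : List String := ["a:1", "b:2", "", "c:3", "", "x:y"]

def Spec_buildRegister (input : List String) (out : List (List (String × String))) : Prop := out = buildRegister_alt input
instance (input : List String) (out : List (List (String × String))) : Decidable (Spec_buildRegister input out) := by unfold Spec_buildRegister; infer_instance

-- ===== CLAIM (what is proved, stated in full; the proofs are below) =====
def Claim_equal_buildRegister : Prop := ∀ (input : List String), Dom_buildRegister input → Pre_buildRegister input → Spec_buildRegister input (buildRegister input)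

-- ===== LEMMAS AND PROOFS =====

lemma parseTok_empty : parseTok "" = none := by decide

lemma split?_of_pre (w : String) (_hw : w ≠ "")
    (hp : ((PySem.Str.split? w ":").getD []).length = 2) :
    ∃ k v, PySem.Str.split? w ":" = some [k, v] := by
  rcases h : PySem.Str.split? w ":" with _ | l
  · rw [h] at hp; simp at hp
  · rw [h] at hp
    simp only [Option.getD_some] at hp
    rcases l with _ | ⟨k, _ | ⟨v, _ | _⟩⟩ <;> simp_all

lemma len_ne_zero_of_ne_empty (w : String) (hw : w ≠ "") : PySem.Str.len w ≠ 0 := by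
  simp [PySem.Str.len_eq]; exact hw

lemma parseTok_of_split (w : String) (k v : String)
    (h : PySem.Str.split? w ":" = some [k, v]) (hw : w ≠ "") : parseTok w = some (k, v) := by
  unfold parseTok
  rw [if_pos (len_ne_zero_of_ne_empty w hw), h]

lemma aStep_empty (st : List (List (String × String)) × PySem.Dict String String) :
    aStep st "" = (st.1 ++ [st.2.items], PySem.Dict.empty) := by
  simp [aStep, PySem.Str.len_eq]

lemma aStep_of_split (st : List (List (String × String)) × PySem.Dict String String)
    (w k v : String) (h : PySem.Str.split? w ":" = some [k, v]) (hw : w ≠ "") :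
    aStep st w = (st.1, st.2.insert k v) := by
  unfold aStep
  rw [if_pos (len_ne_zero_of_ne_empty w hw), h]

-- slice between equal Nat bounds is empty
lemma slice_self_nil {α : Type} (P : List α) (n : Nat) :
    PySem.List.slice P (some (n : Int)) (some (n : Int)) = [] := by
  rw [PySem.List.slice_natCast]; simp

-- extending a slice by one element at index i (start ≤ i < P.length, P[i] known)
lemma slice_snoc {α : Type} (P : List α) (start i : Nat) (x : α) (hsi : start ≤ i)
    (hx : P[i]? = some x) :
    PySem.List.slice P (some (start : Int)) (some ((i : Int) + 1))
      = PySem.List.slice P (some (start : Int)) (some (i : Int)) ++ [x] := by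
  rw [show ((i : Int) + 1) = ((i + 1 : Nat) : Int) by push_cast; ring,
    PySem.List.slice_natCast, PySem.List.slice_natCast]
  rw [show i + 1 - start = (i - start) + 1 by omega, List.take_add_one]
  congr 1
  rw [List.getElem?_drop, show start + (i - start) = i by omega, hx]
  rfl

-- the loop invariant: A's running dict `cur` is the fold of the parsed slice P[start:i],
-- and A's remaining single pass equals B's remaining enumerate pass
lemma main_invariant (ws : List String) : ∀ (P : List (Option (String × String)))
    (start i : Nat) (reg : List (List (String × String))) (cur : PySem.Dict String String),
    (∀ w ∈ ws, w ≠ "" → ((PySem.Str.split? w ":").getD []).length = 2) →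
    start ≤ i → P.drop i = ws.map parseTok →
    cur = (PySem.List.slice P (some (start : Int)) (some (i : Int))).foldl segStep
      PySem.Dict.empty →
    (ws.foldl aStep (reg, cur)).1
      = ((PySem.List.enumerate (ws.map parseTok) (i : Int)).foldl (bStep P) (reg, (start : Int))).1 := by
  induction ws with
  | nil => intro P start i reg cur _ _ _ _; simp [PySem.List.enumerate_nil]
  | cons w rest ih =>
    intro P start i reg cur hpre hsi hdrop hcur
    have hiP : i < P.length := by
      by_contra hle
      rw [List.drop_eq_nil_of_le (by omega)] at hdrop
      simp at hdrop
    have hPi : P[i]? = some (parseTok w) := by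
      have h0 : (P.drop i)[0]? = some (parseTok w) := by rw [hdrop]; rfl
      rw [List.getElem?_drop] at h0
      simpa using h0
    have hdrop' : P.drop (i + 1) = rest.map parseTok := by
      have h1 : P.drop (i + 1) = (P.drop i).drop 1 := by rw [List.drop_drop]
      rw [h1, hdrop]; simp
    rw [List.map_cons, PySem.List.enumerate_cons, List.foldl_cons, List.foldl_cons]
    by_cases hw : w = ""
    · subst hw
      rw [aStep_empty, parseTok_empty]
      have hbs : bStep P (reg, (start : Int)) ((i : Int), none)
          = (reg ++ [dictOfSeg (PySem.List.slice P (some (start : Int)) (some (i : Int)))],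
             (i : Int) + 1) := rfl
      rw [hbs, show ((i : Int) + 1) = ((i + 1 : Nat) : Int) by push_cast; ring]
      have hseg : dictOfSeg (PySem.List.slice P (some (start : Int)) (some (i : Int)))
          = cur.items := by rw [hcur]; rfl
      rw [hseg]
      exact ih P (i + 1) (i + 1) (reg ++ [cur.items]) PySem.Dict.empty
        (fun w hw => hpre w (List.mem_cons_of_mem _ hw)) le_rfl hdrop'
        (by rw [slice_self_nil]; rfl)
    · obtain ⟨k, v, hsplit⟩ :=
        split?_of_pre w hw (hpre w (List.mem_cons_self) hw)
      rw [aStep_of_split _ w k v hsplit hw, parseTok_of_split w k v hsplit hw]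
      have hbs : bStep P (reg, (start : Int)) ((i : Int), some (k, v)) = (reg, (start : Int)) := rfl
      rw [hbs, show ((i : Int) + 1) = ((i + 1 : Nat) : Int) by push_cast; ring]
      refine ih P start (i + 1) reg (cur.insert k v)
        (fun w hw => hpre w (List.mem_cons_of_mem _ hw)) (by omega) hdrop' ?_
      rw [show ((i + 1 : Nat) : Int) = ((i : Int) + 1) by push_cast; ring,
        slice_snoc P start i (parseTok w) hsi hPi, List.foldl_append, ← hcur,
        parseTok_of_split w k v hsplit hw]
      rfl

-- the parse loop of Source B is the map of parseTok
lemma parsed_eq_map (input : List String) :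
    input.foldl (fun acc w => acc ++ [parseTok w]) [] = input.map parseTok := by
  simpa using PySem.List.foldl_append_singleton_eq_map parseTok input []

-- ===== VERDICT (by name: the statement is the Claim_ definition above) =====
theorem buildRegister_spec : Claim_equal_buildRegister := by
  intro input _ hpre
  unfold Spec_buildRegister buildRegister buildRegister_alt
  rw [parsed_eq_map]
  exact main_invariant input (input.map parseTok) 0 0 [] PySem.Dict.empty hpre le_rfl
    (by simp) (by simp [PySem.List.slice_zero_start, PySem.List.slice_to])
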